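-- pv_equiv track=rewrite | github.com/pernici/hobj | src/graphs_gen.py | d_from_m_bip
-- ===== SOURCE A (Python) =====
-- from collections import defaultdict
--
-- def d_from_m_bip(m):
--     d = defaultdict(list)
--     n1 = len(m)
--     for i in range(n1):
--         for j in range(len(m[0])):
--             if m[i][j]:
--                 d[i].append(j+n1)
--                 d[j+n1].append(i)
--     return dict(d)
-- ===== SOURCE B (Python) =====
-- def d_from_m_bip(m):
--     # Different strategy: no incremental appends at all.  Each key's COMPLETE
--     # adjacency list is computed by a comprehension and assigned exactly once,
--     # at the key's first occurrence in a row-major walk: a row key i gets its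
--     # whole row's neighbours; a column key j+n1, when first touched, gets the
--     # whole column scanned top to bottom.
--     n1 = len(m)
--     n2 = len(m[0]) if m else 0
--     d = {}
--     for i in range(n1):
--         cols = [j for j in range(n2) if m[i][j]]
--         if cols:
--             d[i] = [j + n1 for j in cols]
--             for j in cols:
--                 if j + n1 not in d:
--                     d[j + n1] = [i2 for i2 in range(n1) if m[i2][j]]
--     return d
-- ===== Notes on version B (the rewrite author's own statement) =====
-- stated objective: alternative
-- what changed: A builds every adjacency list incrementally, appending one endpoint per truthy cell into a defaultdict; B never appends: each key's complete adjacency list is computed by a comprehension (whole row, or whole column re-scanned top to bottom) and assigned exactly once at the key's first occurrence in the row-major walk.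
import Mathlib
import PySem

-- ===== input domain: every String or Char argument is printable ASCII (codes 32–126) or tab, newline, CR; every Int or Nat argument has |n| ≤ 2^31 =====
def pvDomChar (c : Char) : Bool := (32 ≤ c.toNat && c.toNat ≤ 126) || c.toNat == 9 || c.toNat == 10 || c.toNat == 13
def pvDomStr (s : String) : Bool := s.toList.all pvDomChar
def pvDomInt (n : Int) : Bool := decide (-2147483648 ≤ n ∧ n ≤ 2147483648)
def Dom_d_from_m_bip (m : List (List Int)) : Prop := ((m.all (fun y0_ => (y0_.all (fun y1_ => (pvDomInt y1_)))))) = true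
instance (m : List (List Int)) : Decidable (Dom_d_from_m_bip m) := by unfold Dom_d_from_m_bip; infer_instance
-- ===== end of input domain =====

-- B assigns each key's complete adjacency list once at its first occurrence (no incremental
-- appends, columns re-scanned whole); alternative algorithm, same asymptotic cost;
-- return-value equivalence; neither implementation mutates its argument.

-- ===== PORT A =====
-- fused double loop over a defaultdict(list); d[k].append(x) = modify k [] (· ++ [x])
def d_from_m_bip (m : List (List Int)) : List (Int × List Int) :=
  let n1 : Int := (m.length : Int)
  ((PySem.List.pyRange 0 n1 1).foldl (fun d i =>
    (PySem.List.pyRange 0 ((PySem.List.pyGetD m 0 []).length : Int) 1).foldl (fun d j =>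
      if PySem.List.pyGetD (PySem.List.pyGetD m i []) j 0 ≠ 0 then
        (PySem.Dict.modify (PySem.Dict.modify d i [] (fun l => l ++ [j + n1])) (j + n1) [] (fun l => l ++ [i]))
      else d) d)
    PySem.Dict.empty).items

-- ===== PORT B =====
-- per row: the list `cols` of truthy columns; if nonempty, assign d[i] its whole row list at
-- once, then give each first-seen column key its whole column by a fresh scan of all rows
def d_from_m_bip_alt (m : List (List Int)) : List (Int × List Int) :=
  let n1 : Int := (m.length : Int)
  let n2 : Int := if m = [] then 0 else ((m.headD []).length : Int)
  ((PySem.List.pyRange 0 n1 1).foldl (fun d i =>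
    let cols := (PySem.List.pyRange 0 n2 1).filter
      (fun j => decide (PySem.List.pyGetD (PySem.List.pyGetD m i []) j 0 ≠ 0))
    if cols = [] then d
    else
      cols.foldl (fun d j =>
        if d.contains (j + n1) then d
        else d.insert (j + n1) ((PySem.List.pyRange 0 n1 1).filter
          (fun i2 => decide (PySem.List.pyGetD (PySem.List.pyGetD m i2 []) j 0 ≠ 0))))
        (d.insert i (cols.map (fun j => j + n1))))
    PySem.Dict.empty).items

-- ===== PRECONDITION & SPEC =====
-- Pre_ excludes exactly the jagged matrices with some row shorter than the first row,
-- on which the Python A raises IndexError at m[i][j].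
def Pre_d_from_m_bip (m : List (List Int)) : Prop :=
  ∀ r ∈ m, (m.headD []).length ≤ r.length
instance (m : List (List Int)) : Decidable (Pre_d_from_m_bip m) := by unfold Pre_d_from_m_bip; infer_instance
def pvWitness_d_from_m_bip : List (List Int) := [[1, 0], [0, 1]]

def Spec_d_from_m_bip (m : List (List Int)) (out : List (Int × List Int)) : Prop := out = d_from_m_bip_alt m
instance (m : List (List Int)) (out : List (Int × List Int)) : Decidable (Spec_d_from_m_bip m out) := by unfold Spec_d_from_m_bip; infer_instance

-- ===== CLAIM (what is proved, stated in full; the proofs are below) =====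
def Claim_equal_d_from_m_bip : Prop := ∀ (m : List (List Int)), Dom_d_from_m_bip m → Pre_d_from_m_bip m → Spec_d_from_m_bip m (d_from_m_bip m)

-- ===== LEMMAS AND PROOFS =====

-- the cell test m[i][j] (as both ports read it, totalised by pyGetD)
def cB (m : List (List Int)) (i j : Int) : Bool :=
  decide (PySem.List.pyGetD (PySem.List.pyGetD m i []) j 0 ≠ 0)

-- the two dict events A generates at cell (i, j)
def rowEv (m : List (List Int)) (n1 n2 i : Int) : List (Int × Int) :=
  (PySem.List.pyRange 0 n2 1).flatMap
    (fun j => if cB m i j then [(i, j + n1), (j + n1, i)] else [])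

-- all events of the first k rows, in A's row-major order
def Ev (m : List (List Int)) (n1 n2 k : Int) : List (Int × Int) :=
  (PySem.List.pyRange 0 k 1).flatMap (rowEv m n1 n2)

-- final value of key c: the second components of all events keyed c
def outF (m : List (List Int)) (n1 n2 : Int) (c : Int) : Int × List Int :=
  (c, ((Ev m n1 n2 n1).filter (fun p => p.1 == c)).map (·.2))


-- the single dict event step of A: d[p.1].append(p.2)
def mstep (d : PySem.Dict Int (List Int)) (p : Int × Int) : PySem.Dict Int (List Int) :=
  d.modify p.1 [] (fun l => l ++ [p.2])

-- B's row step with the two sizes abstracted (definitionally the body of B's outer fold)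
def bStep (m : List (List Int)) (n1 n2 : Int) (d : PySem.Dict Int (List Int)) (i : Int) :
    PySem.Dict Int (List Int) :=
  let cols := (PySem.List.pyRange 0 n2 1).filter (fun j => cB m i j)
  if cols = [] then d
  else
    cols.foldl (fun d j =>
      if d.contains (j + n1) then d
      else d.insert (j + n1) ((PySem.List.pyRange 0 n1 1).filter (fun i2 => cB m i2 j)))
      (d.insert i (cols.map (fun j => j + n1)))

-- l.flatMap over guarded singletons is a filtered map
theorem flatMap_if_singleton {α β : Type} (l : List α) (p : α → Bool) (f : α → β) :
    l.flatMap (fun a => if p a then [f a] else []) = (l.filter p).map f := by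
  induction l with
  | nil => rfl
  | cons x xs ih => by_cases h : p x <;> simp [h, ih]

-- a flatMap supported at a single element of a Nodup list collapses to that element
theorem flatMap_eq_of_single {β : Type} (l : List Int) (g : Int → List β) (i : Int)
    (hnd : l.Nodup) (hi : i ∈ l) (h : ∀ a ∈ l, a ≠ i → g a = []) : l.flatMap g = g i := by
  induction l with
  | nil => cases hi
  | cons x xs ih =>
    rcases List.mem_cons.mp hi with rfl | hi'
    · have hrest : xs.flatMap g = [] := by
        apply List.flatMap_eq_nil_iff.mpr
        intro a ha
        exact h a (List.mem_cons_of_mem _ ha) (fun he => (List.nodup_cons.mp hnd).1 (he ▸ ha))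
      simp [hrest]
    · have hx : g x = [] := h x List.mem_cons_self (fun he => (List.nodup_cons.mp hnd).1 (he ▸ hi'))
      simp [hx]
      exact ih (List.nodup_cons.mp hnd).2 hi' (fun a ha => h a (List.mem_cons_of_mem _ ha))

-- every event key of the first k rows is a row index < k or a shifted column index ≥ n1
theorem Ev_key_bound (m : List (List Int)) (n1 n2 k : Int) :
    ∀ p ∈ Ev m n1 n2 k, (0 ≤ p.1 ∧ p.1 < k) ∨ n1 ≤ p.1 := by
  intro p hp
  simp only [Ev, rowEv, List.mem_flatMap] at hp
  obtain ⟨i, hi, j, hj, hpj⟩ := hp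
  rw [PySem.List.mem_pyRange_one] at hi
  rw [PySem.List.mem_pyRange_one] at hj
  split at hpj
  · simp only [List.mem_cons, List.not_mem_nil, or_false] at hpj
    rcases hpj with rfl | rfl
    · left; exact ⟨hi.1, hi.2⟩
    · right; simp; omega
  · cases hpj

-- value of a row key i: its whole row's truthy columns, shifted by n1
theorem outF_row (m : List (List Int)) (n1 n2 i : Int) (hi0 : 0 ≤ i) (hin : i < n1) :
    ((Ev m n1 n2 n1).filter (fun p => p.1 == i)).map (·.2)
      = ((PySem.List.pyRange 0 n2 1).filter (fun j => cB m i j)).map (fun j => j + n1) := by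
  rw [Ev, List.filter_flatMap]
  have hrow : ∀ i' ∈ PySem.List.pyRange 0 n1 1,
      i' ≠ i → (rowEv m n1 n2 i').filter (fun p => p.1 == i) = [] := by
    intro i' hi' hne
    rw [rowEv, List.filter_flatMap]
    apply List.flatMap_eq_nil_iff.mpr
    intro j hj
    rw [PySem.List.mem_pyRange_one] at hj
    split
    · simp only [List.filter_cons, List.filter_nil]
      have h1 : (i' == i) = false := by simp [hne]
      have h2 : (j + n1 == i) = false := by simp; omega
      simp [h1, h2]
    · rfl
  rw [flatMap_eq_of_single _ _ i (PySem.List.nodup_pyRange_one 0 n1)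
        (PySem.List.mem_pyRange_one.mpr ⟨hi0, hin⟩)
        (fun a ha hne => hrow a ha hne)]
  rw [rowEv, List.filter_flatMap]
  have hbody : ∀ j ∈ PySem.List.pyRange 0 n2 1,
      ((if cB m i j then [(i, j + n1), (j + n1, i)] else []).filter (fun p => p.1 == i))
        = (if cB m i j then [(i, j + n1)] else []) := by
    intro j hj
    rw [PySem.List.mem_pyRange_one] at hj
    by_cases h : cB m i j <;> simp [h]
    omega
  rw [List.flatMap_congr hbody, flatMap_if_singleton, List.map_map]
  rfl

-- value of a column key j + n1: its whole column's truthy rows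
theorem outF_col (m : List (List Int)) (n1 n2 j : Int) (hj0 : 0 ≤ j) (hjn : j < n2) :
    ((Ev m n1 n2 n1).filter (fun p => p.1 == j + n1)).map (·.2)
      = (PySem.List.pyRange 0 n1 1).filter (fun i2 => cB m i2 j) := by
  rw [Ev, List.filter_flatMap]
  have hrow : ∀ i ∈ PySem.List.pyRange 0 n1 1,
      (rowEv m n1 n2 i).filter (fun p => p.1 == j + n1)
        = (if cB m i j then [(j + n1, i)] else []) := by
    intro i hi
    rw [PySem.List.mem_pyRange_one] at hi
    rw [rowEv, List.filter_flatMap]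
    have hbody : ∀ j' ∈ PySem.List.pyRange 0 n2 1,
        ((if cB m i j' then [(i, j' + n1), (j' + n1, i)] else []).filter (fun p => p.1 == j + n1))
          = (if j' = j then (if cB m i j then [(j + n1, i)] else []) else []) := by
      intro j' hj'
      rw [PySem.List.mem_pyRange_one] at hj'
      have h1 : (i == j + n1) = false := by simp; omega
      have h2 : (j' + n1 == j + n1) = decide (j' = j) := by
        by_cases he : j' = j <;> simp [he]
      by_cases hcb : cB m i j' <;> by_cases he : j' = j
      · subst he
        simp [hcb, h1]
      · simp [hcb, h1, h2, he]
      · subst he; simp [hcb]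
      · simp [hcb, he]
    rw [List.flatMap_congr hbody]
    rw [flatMap_eq_of_single _ _ j (PySem.List.nodup_pyRange_one 0 n2)
          (PySem.List.mem_pyRange_one.mpr ⟨hj0, hjn⟩) (fun a _ hne => by simp [hne])]
    simp
  rw [List.flatMap_congr hrow, List.map_flatMap]
  have : ∀ i : Int, ((if cB m i j then [(j + n1, i)] else []).map (·.2))
      = (if cB m i j then [i] else []) := by
    intro i; by_cases h : cB m i j <;> simp [h]
  simp only [this]
  rw [flatMap_if_singleton]
  simp

-- A's double loop is the fold of the event list
theorem A_eq_evfold (m : List (List Int)) :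
    d_from_m_bip m =
      ((Ev m (m.length : Int) ((PySem.List.pyGetD m 0 []).length : Int) (m.length : Int)).foldl
        mstep PySem.Dict.empty).items := by
  unfold d_from_m_bip Ev
  dsimp only
  rw [List.foldl_flatMap]
  congr 1
  apply List.foldl_ext
  intro d i _
  rw [rowEv]
  rw [List.foldl_flatMap]
  apply List.foldl_ext
  intro d j _
  by_cases h : PySem.List.pyGetD (PySem.List.pyGetD m i []) j 0 ≠ 0 <;>
    simp [cB, h, mstep]

-- A's items: the dedup'd event keys, each paired with all its event values
theorem A_items (m : List (List Int)) :
    d_from_m_bip m =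
      (PySem.Set.ofList ((Ev m (m.length : Int) ((PySem.List.pyGetD m 0 []).length : Int)
          (m.length : Int)).map (·.1))).map
        (outF m (m.length : Int) ((PySem.List.pyGetD m 0 []).length : Int)) := by
  rw [A_eq_evfold]
  set E := Ev m (m.length : Int) ((PySem.List.pyGetD m 0 []).length : Int) (m.length : Int) with hE
  have hkeys : ((E.foldl mstep PySem.Dict.empty).keys) = PySem.Set.ofList (E.map (·.1)) := by
    have := PySem.Dict.keys_foldl_modify_key E Prod.fst []
      (fun _ p => fun l => l ++ [p.2]) PySem.Dict.empty
    simpa [mstep, PySem.Set.update_nil_left, PySem.Dict.keys] using this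
  have hnd : ((E.foldl mstep PySem.Dict.empty).keys).Nodup := by
    apply PySem.Dict.nodup_keys_foldl_modify_key E Prod.fst []
      (fun _ p => fun l => l ++ [p.2]) PySem.Dict.empty
    simp [PySem.Dict.keys, PySem.Dict.empty]
  rw [PySem.Dict.items_eq_map_keys _ hnd []]
  rw [hkeys]
  apply List.map_congr_left
  intro c _
  have hget : (E.foldl mstep PySem.Dict.empty).getD c []
      = PySem.Dict.empty.getD c [] ++ (E.filter (fun p => p.1 == c)).map (·.2) :=
    PySem.Dict.getD_foldl_modify_append E PySem.Dict.empty c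
  rw [hget]
  simp [outF, PySem.Dict.getD_empty, hE]




-- B's dict is the first-row-length expression A indexes with
theorem n2B_eq (m : List (List Int)) :
    (if m = [] then (0:Int) else ((m.headD []).length : Int))
      = ((PySem.List.pyGetD m 0 []).length : Int) := by
  cases m <;> simp [PySem.List.pyGetD, PySem.List.pyIdx?, PySem.List.pyGet?]

-- membership test on a dict whose items are S.map outF is membership in S
theorem contains_map_outF (m : List (List Int)) (n1 n2 : Int) (S : List Int) (k : Int) :
    (PySem.Dict.mk (S.map (outF m n1 n2))).contains k = decide (k ∈ S) := by
  rw [PySem.Dict.contains, List.any_map]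
  rw [show ((fun p : Int × List Int => p.1 == k) ∘ (outF m n1 n2)) = (fun c => c == k) from rfl]
  induction S with
  | nil => simp
  | cons x xs ih =>
    simp [ih, List.mem_cons]
    by_cases h : x = k
    · subst h; simp
    · simp [h, Ne.symm h]

-- B's inner column loop mirrors a foldl of set-adds on the key list
theorem inner_fold (m : List (List Int)) (n1 n2 : Int) (cs : List Int) : ∀ (S : List Int),
    (∀ j ∈ cs, outF m n1 n2 (j + n1)
        = (j + n1, (PySem.List.pyRange 0 n1 1).filter (fun i2 => cB m i2 j))) →
    (cs.foldl (fun d j => if d.contains (j + n1) then d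
        else d.insert (j + n1) ((PySem.List.pyRange 0 n1 1).filter (fun i2 => cB m i2 j)))
      (PySem.Dict.mk (S.map (outF m n1 n2)))).items
    = (cs.foldl (fun S j => PySem.Set.add S (j + n1)) S).map (outF m n1 n2) := by
  induction cs with
  | nil => intro S _; rfl
  | cons j cs ih =>
    intro S hyp
    simp only [List.foldl_cons]
    by_cases hm : (j + n1) ∈ S
    · rw [contains_map_outF]
      simp only [hm, decide_true]
      rw [PySem.Set.add_of_mem hm]
      exact ih S (fun a ha => hyp a (List.mem_cons_of_mem _ ha))
    · rw [contains_map_outF]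
      simp only [hm, decide_false]
      have hins : (PySem.Dict.mk (S.map (outF m n1 n2))).insert (j + n1)
            ((PySem.List.pyRange 0 n1 1).filter (fun i2 => cB m i2 j))
          = PySem.Dict.mk ((S ++ [j + n1]).map (outF m n1 n2)) := by
        apply PySem.Dict.ext
        rw [PySem.Dict.items_insert_of_not_contains]
        · rw [List.map_append, List.map_singleton, hyp j List.mem_cons_self]
        · rw [contains_map_outF]; simp [hm]
      rw [hins, PySem.Set.add_of_not_mem hm]
      exact ih (S ++ [j + n1]) (fun a ha => hyp a (List.mem_cons_of_mem _ ha))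

-- an add of an already-present element inside a guarded fold is a no-op
theorem foldl_add_skip (t : Int) (g : Int → Int) (q : Int → Bool) (L : List Int) :
    ∀ S : PySem.Set Int, t ∈ S →
    L.foldl (fun S j => if q j then PySem.Set.add (PySem.Set.add S t) (g j) else S) S
      = (L.filter q).foldl (fun S j => PySem.Set.add S (g j)) S := by
  induction L with
  | nil => intro S _; rfl
  | cons a L ih =>
    intro S ht
    by_cases hq : q a
    · simp only [List.foldl_cons, if_pos hq, List.filter_cons_of_pos hq]
      rw [PySem.Set.add_of_mem ht]
      exact ih _ ((PySem.Set.mem_add _ _ _).mpr (Or.inl ht))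
    · simp only [List.foldl_cons, if_neg hq, List.filter_cons_of_neg hq]
      exact ih S ht

-- the first truthy guard adds t once; afterwards only the g-adds remain
theorem foldl_add_first (t : Int) (g : Int → Int) (q : Int → Bool) (L : List Int) :
    ∀ S : PySem.Set Int, t ∉ S → L.filter q ≠ [] →
    L.foldl (fun S j => if q j then PySem.Set.add (PySem.Set.add S t) (g j) else S) S
      = (L.filter q).foldl (fun S j => PySem.Set.add S (g j)) (S ++ [t]) := by
  induction L with
  | nil => intro S _ h; exact absurd rfl h
  | cons a L ih =>
    intro S ht hne
    by_cases hq : q a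
    · simp only [List.foldl_cons, if_pos hq, List.filter_cons_of_pos hq]
      rw [PySem.Set.add_of_not_mem ht]
      exact foldl_add_skip t g q L _
        ((PySem.Set.mem_add _ _ _).mpr (Or.inl (List.mem_append.mpr (Or.inr (List.mem_singleton_self t)))))
    · simp only [List.foldl_cons, if_neg hq]
      rw [List.filter_cons_of_neg hq] at hne ⊢
      exact ih S ht hne

-- the key stream of one row: t before each shifted column, per truthy cell
theorem rowEv_map_fst (m : List (List Int)) (n1 n2 t : Int) :
    (rowEv m n1 n2 t).map (·.1)
      = (PySem.List.pyRange 0 n2 1).flatMap (fun j => if cB m t j then [t, j + n1] else []) := by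
  rw [rowEv, List.map_flatMap]
  apply List.flatMap_congr
  intro j _
  by_cases h : cB m t j <;> simp [h]

-- an all-zero row generates no events
theorem rowEv_eq_nil (m : List (List Int)) (n1 n2 t : Int)
    (h : (PySem.List.pyRange 0 n2 1).filter (fun j => cB m t j) = []) :
    rowEv m n1 n2 t = [] := by
  rw [rowEv]
  apply List.flatMap_eq_nil_iff.mpr
  intro j hj
  have := List.filter_eq_nil_iff.mp h j hj
  simp at this
  simp [this]

-- events split row by row
theorem Ev_succ (m : List (List Int)) (n1 n2 t : Int) (ht : 0 ≤ t) :
    Ev m n1 n2 (t + 1) = Ev m n1 n2 t ++ rowEv m n1 n2 t := by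
  rw [Ev, Ev, PySem.List.pyRange_one_succ_right ht, List.flatMap_append]
  simp

-- B's outer fold keeps its items equal to the dedup'd event keys mapped through outF
theorem B_fold_char (m : List (List Int)) (n1 n2 : Int) (t : Nat) (ht : (t : Int) ≤ n1) :
    ((PySem.List.pyRange 0 (t : Int) 1).foldl (bStep m n1 n2) PySem.Dict.empty).items
      = (PySem.Set.ofList ((Ev m n1 n2 (t : Int)).map (·.1))).map (outF m n1 n2) := by
  induction t with
  | zero =>
    rw [show ((0 : Nat) : Int) = 0 from rfl, PySem.List.pyRange_one_eq_nil (le_refl 0)]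
    rw [Ev, PySem.List.pyRange_one_eq_nil (le_refl 0)]
    rfl
  | succ t ih =>
    have ht' : (t : Int) ≤ n1 := by push_cast at ht ⊢; omega
    have htlt : (t : Int) < n1 := by push_cast at ht; omega
    have hcast : ((t + 1 : Nat) : Int) = (t : Int) + 1 := by push_cast; ring
    rw [hcast, PySem.List.pyRange_one_succ_right (by positivity), List.foldl_append,
      Ev_succ _ _ _ _ (by positivity)]
    simp only [List.foldl_cons, List.foldl_nil]
    have hd : (PySem.List.pyRange 0 (t : Int) 1).foldl (bStep m n1 n2) PySem.Dict.empty
        = PySem.Dict.mk ((PySem.Set.ofList ((Ev m n1 n2 (t : Int)).map (·.1))).map (outF m n1 n2)) :=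
      PySem.Dict.ext (ih ht')
    rw [hd]
    set S : PySem.Set Int := PySem.Set.ofList ((Ev m n1 n2 (t : Int)).map (·.1)) with hS
    have hfresh : (t : Int) ∉ S := by
      intro hmem
      rw [hS, PySem.Set.mem_ofList] at hmem
      obtain ⟨p, hp, hp1⟩ := List.mem_map.mp hmem
      have := Ev_key_bound m n1 n2 (t : Int) p hp
      omega
    rw [bStep]
    by_cases hc : (PySem.List.pyRange 0 n2 1).filter (fun j => cB m (t : Int) j) = []
    · rw [if_pos hc, rowEv_eq_nil _ _ _ _ hc]
      simp
      rw [← hS]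
    · rw [if_neg hc]
      set cols := (PySem.List.pyRange 0 n2 1).filter (fun j => cB m (t : Int) j) with hcols
      have hcont : (PySem.Dict.mk (S.map (outF m n1 n2))).contains (t : Int) = false := by
        rw [contains_map_outF]; simp [hfresh]
      have hrowval : outF m n1 n2 (t : Int) = ((t : Int), cols.map (fun j => j + n1)) := by
        unfold outF
        rw [outF_row m n1 n2 (t : Int) (by positivity) htlt]
      have hins : (PySem.Dict.mk (S.map (outF m n1 n2))).insert (t : Int) (cols.map (fun j => j + n1))
          = PySem.Dict.mk ((S ++ [(t : Int)]).map (outF m n1 n2)) := by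
        apply PySem.Dict.ext
        rw [PySem.Dict.items_insert_of_not_contains _ _ hcont]
        rw [List.map_append, List.map_singleton, hrowval]
      rw [hins]
      rw [inner_fold m n1 n2 cols (S ++ [(t : Int)]) (by
        intro j hj
        rw [hcols] at hj
        have hjb := PySem.List.mem_pyRange_one.mp (List.mem_of_mem_filter hj)
        unfold outF
        rw [outF_col m n1 n2 j hjb.1 hjb.2])]
      congr 1
      rw [List.map_append, PySem.Set.ofList_append, rowEv_map_fst]
      rw [show PySem.Set.update S ((PySem.List.pyRange 0 n2 1).flatMap
            (fun j => if cB m (t : Int) j then [(t : Int), j + n1] else []))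
          = ((PySem.List.pyRange 0 n2 1).flatMap
            (fun j => if cB m (t : Int) j then [(t : Int), j + n1] else [])).foldl
              PySem.Set.add S from rfl]
      rw [List.foldl_flatMap]
      have hcollapse : ∀ (S' : PySem.Set Int), ∀ j ∈ PySem.List.pyRange 0 n2 1,
          (if cB m (t : Int) j then [(t : Int), j + n1] else []).foldl PySem.Set.add S'
            = (if cB m (t : Int) j then PySem.Set.add (PySem.Set.add S' (t : Int)) (j + n1) else S') := by
        intro S' j _
        by_cases h : cB m (t : Int) j <;> simp [h]
      rw [List.foldl_ext _ _ _ hcollapse, hcols]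
      exact (foldl_add_first (t : Int) (fun j => j + n1) (fun j => cB m (t : Int) j)
        _ S hfresh hc).symm

-- B is that characterization at t = n1
theorem B_items (m : List (List Int)) :
    d_from_m_bip_alt m =
      (PySem.Set.ofList ((Ev m (m.length : Int) ((PySem.List.pyGetD m 0 []).length : Int)
          (m.length : Int)).map (·.1))).map
        (outF m (m.length : Int) ((PySem.List.pyGetD m 0 []).length : Int)) := by
  unfold d_from_m_bip_alt
  rw [n2B_eq m]
  exact B_fold_char m (m.length : Int) ((PySem.List.pyGetD m 0 []).length : Int)
    m.length (le_refl _)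

theorem d_from_m_bip_eq (m : List (List Int)) : d_from_m_bip m = d_from_m_bip_alt m := by
  rw [A_items, B_items]

-- ===== VERDICT (by name) =====
theorem d_from_m_bip_spec : Claim_equal_d_from_m_bip := by
  intro m _ _
  unfold Spec_d_from_m_bip
  exact d_from_m_bip_eq m
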